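-- pv_equiv track=rewrite | github.com/njogucy/cyril-analytics | week01/day05_exercises.py | group_by_county
-- ===== SOURCE A (Python) =====
-- def group_by_county(student_list):
--    groups = {}
--    for s in student_list:
--       county = s['county']
--       if county not in groups:
--          groups[county] = []
--       groups[county].append(s['name'])
--    return groups
-- ===== SOURCE B (Python) =====
-- def group_by_county(student_list):
--     # Two-phase: collect the distinct counties in first-appearance order,
--     # then build each group with one filtering pass per county.
--     counties = []
--     for s in student_list:
--         c = s['county']
--         if c not in counties:
--             counties.append(c)
--     return {c: [s['name'] for s in student_list if s['county'] == c]
--             for c in counties}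
-- ===== Notes on version B (the rewrite author's own statement) =====
-- stated objective: alternative
-- what changed: Replaces the single-pass dict accumulation (insert-empty-then-append per student) by a two-phase strategy: first collect the distinct counties in first-appearance order, then build each group's name list with a filtering pass over the whole input per county.
import Mathlib
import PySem

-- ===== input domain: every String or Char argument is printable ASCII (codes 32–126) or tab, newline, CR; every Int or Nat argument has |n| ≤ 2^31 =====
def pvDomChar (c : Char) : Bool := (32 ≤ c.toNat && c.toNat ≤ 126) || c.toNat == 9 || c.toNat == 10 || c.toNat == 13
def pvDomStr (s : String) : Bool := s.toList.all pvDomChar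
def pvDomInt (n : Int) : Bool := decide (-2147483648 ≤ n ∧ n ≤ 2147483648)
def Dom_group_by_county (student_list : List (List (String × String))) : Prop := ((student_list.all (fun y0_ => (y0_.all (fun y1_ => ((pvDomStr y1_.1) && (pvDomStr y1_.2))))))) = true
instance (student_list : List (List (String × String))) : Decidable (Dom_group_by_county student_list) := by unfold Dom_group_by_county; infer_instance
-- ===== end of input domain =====

-- B replaces A's single-pass dict accumulation by a two-phase strategy (collect distinct
-- counties, then one filtering pass per county); objective: alternative, same results.


-- shared helper: s['k'] for a student record (Pre_ guarantees the key is present)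
def pvGetStr (s : List (String × String)) (k : String) : String :=
  ((PySem.Dict.mk s).get? k).getD ""

-- ===== PORT A =====
def group_by_county (student_list : List (List (String × String))) : List (String × List String) :=
  (student_list.foldl
    (fun (groups : PySem.Dict String (List String)) s =>
      let county := pvGetStr s "county"
      let groups := if groups.contains county then groups else groups.insert county []
      groups.modify county [] (fun l => l ++ [pvGetStr s "name"]))
    PySem.Dict.empty).items

-- ===== PORT B =====
def group_by_county_alt (student_list : List (List (String × String))) : List (String × List String) :=
  let counties := student_list.foldl
    (fun (cs : List String) s =>
      let c := pvGetStr s "county"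
      if cs.contains c then cs else cs ++ [c]) []
  counties.map (fun c =>
    (c, (student_list.filter (fun s => pvGetStr s "county" == c)).map
          (fun s => pvGetStr s "name")))

-- ===== PRECONDITION & SPEC =====
-- Pre_ excludes students missing a 'county' or 'name' key: there Python A raises KeyError
-- (and B raises too).
def Pre_group_by_county (student_list : List (List (String × String))) : Prop :=
  ∀ s ∈ student_list,
    (PySem.Dict.mk s).contains "county" = true ∧ (PySem.Dict.mk s).contains "name" = true
instance (student_list : List (List (String × String))) : Decidable (Pre_group_by_county student_list) := by unfold Pre_group_by_county; infer_instance

def pvWitness_group_by_county : (List (List (String × String))) :=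
  [[("county", "Nairobi"), ("name", "Amina")], [("county", "Kisumu"), ("name", "Brian")]]

def Spec_group_by_county (student_list : List (List (String × String))) (out : List (String × List String)) : Prop := out = group_by_county_alt student_list
instance (student_list : List (List (String × String))) (out : List (String × List String)) : Decidable (Spec_group_by_county student_list out) := by unfold Spec_group_by_county; infer_instance

-- ===== CLAIM (what is proved, stated in full; the proofs are below) =====
def Claim_equal_group_by_county : Prop := ∀ (student_list : List (List (String × String))), Dom_group_by_county student_list → Pre_group_by_county student_list → Spec_group_by_county student_list (group_by_county student_list)

-- ===== LEMMAS AND PROOFS =====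

-- A's per-student step (insert [] if absent, then append) is exactly Dict.modify with default [].
theorem step_eq_modify (d : PySem.Dict String (List String)) (c : String)
    (f : List String → List String) :
    (if d.contains c then d else d.insert c []).modify c [] f = d.modify c [] f := by
  by_cases h : d.contains c = true
  · simp [h]
  · simp only [h, if_neg, Bool.not_eq_true]
    unfold PySem.Dict.modify
    rw [PySem.Dict.getD_insert_self, PySem.Dict.insert_insert_self,
      PySem.Dict.getD_of_not_contains d [] (by simpa using h)]

theorem group_by_county_spec : Claim_equal_group_by_county := by
  intro l _ _
  unfold Spec_group_by_county group_by_county group_by_county_alt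
  -- normalise A's foldl step to a plain Dict.modify loop
  have hstep :
      (fun (groups : PySem.Dict String (List String)) s =>
        let county := pvGetStr s "county"
        let groups := if groups.contains county then groups else groups.insert county []
        groups.modify county [] (fun l => l ++ [pvGetStr s "name"]))
      = (fun (d : PySem.Dict String (List String)) s =>
          d.modify (pvGetStr s "county") [] (fun l => l ++ [pvGetStr s "name"])) := by
    funext d s
    exact step_eq_modify d (pvGetStr s "county") _
  rw [hstep]
  -- normalise B's county-collection loop to Set.ofList of the mapped keys
  have hcs :
      l.foldl (fun (cs : List String) s =>
          let c := pvGetStr s "county"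
          if cs.contains c then cs else cs ++ [c]) []
        = PySem.Set.ofList (l.map (fun s => pvGetStr s "county")) := by
    rw [← PySem.Set.update_nil_left, PySem.Set.update_map_eq_foldl_add]
    rfl
  rw [hcs]
  set D := l.foldl (fun (d : PySem.Dict String (List String)) s =>
      d.modify (pvGetStr s "county") [] (fun l => l ++ [pvGetStr s "name"])) PySem.Dict.empty with hD
  have hnodup : D.keys.Nodup := by
    rw [hD]
    exact PySem.Dict.nodup_keys_foldl_modify_key l (fun s => pvGetStr s "county") []
      (fun _ s => fun v => v ++ [pvGetStr s "name"]) PySem.Dict.empty (by simp)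
  have hkeys : D.keys = PySem.Set.ofList (l.map (fun s => pvGetStr s "county")) := by
    rw [hD, PySem.Dict.keys_foldl_modify_key l (fun s => pvGetStr s "county") []
      (fun _ s => fun v => v ++ [pvGetStr s "name"]) PySem.Dict.empty]
    simp [PySem.Set.update_nil_left]
  have hgetD : ∀ c, D.getD c [] =
      (l.filter (fun s => pvGetStr s "county" == c)).map (fun s => pvGetStr s "name") := by
    intro c
    have hmap : l.foldl (fun (d : PySem.Dict String (List String)) s =>
        d.modify (pvGetStr s "county") [] (fun l => l ++ [pvGetStr s "name"])) PySem.Dict.empty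
        = (l.map (fun s => (pvGetStr s "county", pvGetStr s "name"))).foldl
            (fun d p => d.modify p.1 [] (fun v => v ++ [p.2])) PySem.Dict.empty := by
      rw [List.foldl_map]
    rw [hD, hmap, PySem.Dict.getD_foldl_modify_append]
    simp [List.filter_map, List.map_map, Function.comp_def]
  rw [PySem.Dict.items_eq_map_keys D hnodup [], hkeys]
  exact List.map_congr_left (fun c _ => by rw [hgetD c])
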